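-- pv_equiv track=rewrite | github.com/Motterdude/nanum-pipeline-28 | pipeline29_config_gui.py | _build_source_catalog_from_records
-- ===== SOURCE A (Python) =====
-- from typing import Any, Callable, Dict, List, Optional, Tuple
--
-- def _build_source_catalog_from_records(records: List[Dict[str, str]]) -> Dict[str, str]:
--     catalog: Dict[str, str] = {
--         "User input": "Manual assumption entered by the user. Typical use: +/- limit informed directly for the sensor.",
--         "ASTM E230 / ANSI MC96.1 summary": "Thermocouple standard-grade tolerance reference used for K/T sensor uncertainty.",
--         "NI 9213 datasheet Fig. 3 (approx.)": "Approximate NI 9213 module uncertainty for Type K based on the datasheet curves.",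
--         "NI 9213 datasheet Fig. 4 (approx.)": "Approximate NI 9213 module uncertainty for Type T based on the datasheet curves.",
--     }
--
--     grouped: Dict[str, List[Dict[str, str]]] = {}
--     for record in records:
--         source = str(record.get("source", "")).strip()
--         if not source:
--             continue
--         grouped.setdefault(source, []).append(record)
--
--     for source, source_records in grouped.items():
--         components = sorted({str(row.get("component", "")).strip() for row in source_records if str(row.get("component", "")).strip()})
--         notes = sorted({str(row.get("notes", "")).strip() for row in source_records if str(row.get("notes", "")).strip()})
--         parts: List[str] = []
--         if components:
--             preview = ", ".join(components[:3])
--             if len(components) > 3: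
--                 preview += ", ..."
--             parts.append(f"Components: {preview}")
--         if notes:
--             parts.append(notes[0])
--         if parts:
--             catalog[source] = " ".join(parts)
--
--     return catalog
-- ===== SOURCE B (Python) =====
-- from typing import Dict, List
--
-- def _build_source_catalog_from_records(records: List[Dict[str, str]]) -> Dict[str, str]:
--     catalog: Dict[str, str] = {
--         "User input": "Manual assumption entered by the user. Typical use: +/- limit informed directly for the sensor.",
--         "ASTM E230 / ANSI MC96.1 summary": "Thermocouple standard-grade tolerance reference used for K/T sensor uncertainty.",
--         "NI 9213 datasheet Fig. 3 (approx.)": "Approximate NI 9213 module uncertainty for Type K based on the datasheet curves.",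
--         "NI 9213 datasheet Fig. 4 (approx.)": "Approximate NI 9213 module uncertainty for Type T based on the datasheet curves.",
--     }
--
--     # No grouping structure at all: first list the distinct sources in first-occurrence
--     # order, then summarise each source by a direct scan over the records.
--     seen: List[str] = []
--     for record in records:
--         source = str(record.get("source", "")).strip()
--         if source and source not in seen:
--             seen.append(source)
--
--     for source in seen:
--         components: set = set()
--         notes: set = set()
--         for record in records:
--             if str(record.get("source", "")).strip() != source:
--                 continue
--             component = str(record.get("component", "")).strip()
--             if component:
--                 components.add(component)
--             note = str(record.get("notes", "")).strip()
--             if note: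
--                 notes.add(note)
--         parts: List[str] = []
--         ordered = sorted(components)
--         if ordered:
--             preview = ", ".join(ordered[:3])
--             if len(ordered) > 3:
--                 preview += ", ..."
--             parts.append("Components: " + preview)
--         if notes:
--             parts.append(min(notes))
--         if parts:
--             catalog[source] = " ".join(parts)
--
--     return catalog
-- ===== Notes on version B (the rewrite author's own statement) =====
-- stated objective: alternative
-- what changed: A builds a dict grouping each source to its list of records and then re-scans every group with set comprehensions; B keeps no grouping structure at all: it first collects the distinct non-empty sources in first-occurrence order, then summarises each source by a direct scan over the original records, accumulating the component/note sets inline and formatting immediately (min(notes) instead of sorted(notes)[0]).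
import Mathlib
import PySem

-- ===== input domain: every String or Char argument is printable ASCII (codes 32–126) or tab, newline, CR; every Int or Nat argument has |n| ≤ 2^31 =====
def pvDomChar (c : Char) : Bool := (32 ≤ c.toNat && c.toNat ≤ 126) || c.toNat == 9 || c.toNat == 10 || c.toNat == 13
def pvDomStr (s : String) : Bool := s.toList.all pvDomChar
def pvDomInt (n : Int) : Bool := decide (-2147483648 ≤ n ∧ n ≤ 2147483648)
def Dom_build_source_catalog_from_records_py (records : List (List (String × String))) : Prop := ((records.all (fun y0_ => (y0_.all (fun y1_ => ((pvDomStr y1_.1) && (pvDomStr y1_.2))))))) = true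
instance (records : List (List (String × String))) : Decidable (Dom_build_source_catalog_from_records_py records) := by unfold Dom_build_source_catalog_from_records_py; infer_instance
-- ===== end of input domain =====

-- B keeps no grouping structure: it lists the distinct non-empty sources in first-occurrence
-- order, then summarises each source by a direct scan over the records (accumulating the
-- component/note sets inline); objective: alternative algorithm, same results.

-- shared helpers (identical expressions occur in both Pythons)
def pvCatalogDefaults : List (String × String) :=
  [("User input", "Manual assumption entered by the user. Typical use: +/- limit informed directly for the sensor."),
   ("ASTM E230 / ANSI MC96.1 summary", "Thermocouple standard-grade tolerance reference used for K/T sensor uncertainty."),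
   ("NI 9213 datasheet Fig. 3 (approx.)", "Approximate NI 9213 module uncertainty for Type K based on the datasheet curves."),
   ("NI 9213 datasheet Fig. 4 (approx.)", "Approximate NI 9213 module uncertainty for Type T based on the datasheet curves.")]

-- str(record.get(k, "")).strip()
def pvGetStrip (row : List (String × String)) (k : String) : String :=
  PySem.Str.strip ((PySem.Dict.mk row).getD k "")

-- ===== PORT A =====
-- grouped.setdefault(source, []).append(record)  ≡  modify source [] (· ++ [record])
def pvA_groupStep (grouped : PySem.Dict String (List (List (String × String))))
    (record : List (String × String)) : PySem.Dict String (List (List (String × String))) :=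
  let source := pvGetStrip record "source"
  if source == "" then grouped
  else grouped.modify source [] (fun l => l ++ [record])

def pvA_formatStep (catalog : PySem.Dict String String)
    (sr : String × List (List (String × String))) : PySem.Dict String String :=
  let components := PySem.List.sorted (PySem.Set.ofList
    ((sr.2.map (fun row => pvGetStrip row "component")).filter (fun c => !(c == "")))) id
  let notes := PySem.List.sorted (PySem.Set.ofList
    ((sr.2.map (fun row => pvGetStrip row "notes")).filter (fun c => !(c == "")))) id
  let parts : List String := []
  let parts := if components.isEmpty then parts else
    (let preview := PySem.Str.join ", " (PySem.List.slice components none (some 3))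
     let preview := if components.length > 3 then preview ++ ", ..." else preview
     parts ++ ["Components: " ++ preview])
  let parts := match notes with
    | [] => parts
    | n :: _ => parts ++ [n]
  if parts.isEmpty then catalog else catalog.insert sr.1 (PySem.Str.join " " parts)

def build_source_catalog_from_records_py (records : List (List (String × String))) : List (String × String) :=
  ((records.foldl pvA_groupStep (PySem.Dict.mk [])).items.foldl
      pvA_formatStep (PySem.Dict.mk pvCatalogDefaults)).items

-- ===== PORT B =====
-- if source and source not in seen: seen.append(source)
def pvSeenStep (seen : List String) (record : List (String × String)) : List String :=
  let source := pvGetStrip record "source"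
  if source == "" then seen
  else if seen.contains source then seen
  else seen ++ [source]

-- inner loop body: skip records of other sources, add stripped non-empty fields to the two sets
def pvB_collectStep (source : String) (cn : PySem.Set String × PySem.Set String)
    (record : List (String × String)) : PySem.Set String × PySem.Set String :=
  if !(pvGetStrip record "source" == source) then cn
  else
    let component := pvGetStrip record "component"
    let cn := if component == "" then cn else (PySem.Set.add cn.1 component, cn.2)
    let note := pvGetStrip record "notes"
    if note == "" then cn else (cn.1, PySem.Set.add cn.2 note)

def pvB_sourceStep (records : List (List (String × String)))
    (catalog : PySem.Dict String String) (source : String) : PySem.Dict String String :=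
  let cn := records.foldl (pvB_collectStep source) (PySem.Set.empty, PySem.Set.empty)
  let parts : List String := []
  let ordered := PySem.List.sorted cn.1 id
  let parts := if ordered.isEmpty then parts else
    (let preview := PySem.Str.join ", " (PySem.List.slice ordered none (some 3))
     let preview := if ordered.length > 3 then preview ++ ", ..." else preview
     parts ++ ["Components: " ++ preview])
  let parts := if cn.2.isEmpty then parts else
    (match PySem.List.min? cn.2 id with
     | some m => parts ++ [m]
     | none => parts)
  if parts.isEmpty then catalog else catalog.insert source (PySem.Str.join " " parts)

def build_source_catalog_from_records_py_alt (records : List (List (String × String))) : List (String × String) :=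
  ((records.foldl pvSeenStep []).foldl (pvB_sourceStep records) (PySem.Dict.mk pvCatalogDefaults)).items

-- ===== PRECONDITION & SPEC =====
def Spec_build_source_catalog_from_records_py (records : List (List (String × String))) (out : List (String × String)) : Prop := out = build_source_catalog_from_records_py_alt records
instance (records : List (List (String × String))) (out : List (String × String)) : Decidable (Spec_build_source_catalog_from_records_py records out) := by unfold Spec_build_source_catalog_from_records_py; infer_instance

-- ===== CLAIM (what is proved, stated in full; the proofs are below) =====
def Claim_equal_build_source_catalog_from_records_py : Prop := ∀ (records : List (List (String × String))), Dom_build_source_catalog_from_records_py records → Spec_build_source_catalog_from_records_py records (build_source_catalog_from_records_py records)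

-- ===== LEMMAS AND PROOFS =====

def pvKey (r : List (String × String)) : String := pvGetStrip r "source"
def pvFilt (records : List (List (String × String))) : List (List (String × String)) :=
  records.filter (fun r => !(pvKey r == ""))
def pvGrp (records : List (List (String × String))) (s : String) : List (List (String × String)) :=
  records.filter (fun r => pvKey r == s)

-- A's grouping fold is the unguarded modify-fold over the records with a non-empty source
lemma pv_group_filter (records : List (List (String × String)))
    (d : PySem.Dict String (List (List (String × String)))) :
    records.foldl pvA_groupStep d
      = (pvFilt records).foldl (fun d r => d.modify (pvKey r) [] (fun l => l ++ [r])) d := by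
  unfold pvFilt
  rw [← PySem.List.foldl_if_eq_foldl_filter]
  refine PySem.List.foldl_congr_mem _ _ _ _ ?_
  intro acc r _
  by_cases h : pvKey r == "" <;> simp [pvA_groupStep, pvKey]

lemma pv_seen_eq (records : List (List (String × String))) :
    records.foldl pvSeenStep [] = PySem.Set.ofList ((pvFilt records).map pvKey) := by
  have h1 : records.foldl pvSeenStep []
      = (pvFilt records).foldl (fun s r => PySem.Set.add s (pvKey r)) [] := by
    unfold pvFilt
    rw [← PySem.List.foldl_if_eq_foldl_filter]
    refine PySem.List.foldl_congr_mem _ _ _ _ ?_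
    intro acc r _
    by_cases h : pvKey r == "" <;>
      simp [pvSeenStep, pvKey, PySem.Set.add, PySem.Set.contains]
  rw [h1, ← PySem.Set.update_map_eq_foldl_add, PySem.Set.update_nil_left]

lemma pv_seen_ne (records : List (List (String × String))) (s : String)
    (h : s ∈ records.foldl pvSeenStep []) : s ≠ "" := by
  rw [pv_seen_eq] at h
  have h2 := (PySem.Set.mem_ofList _ s).mp h
  obtain ⟨r, hr, hk⟩ := List.mem_map.mp h2
  have h3 := List.of_mem_filter hr
  rw [← hk]
  simpa using h3

lemma pv_grp_filt (records : List (List (String × String))) (s : String) (hs : s ≠ "") :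
    pvGrp (pvFilt records) s = pvGrp records s := by
  unfold pvGrp pvFilt
  rw [List.filter_filter]
  refine List.filter_congr ?_
  intro r _
  by_cases h : pvKey r = s
  · subst h
    simp [hs]
  · simp [h]

lemma pv_collect_eq (records : List (List (String × String))) (s : String) :
    records.foldl (pvB_collectStep s) (PySem.Set.empty, PySem.Set.empty)
      = (PySem.Set.ofList (((pvGrp records s).map (fun r => pvGetStrip r "component")).filter (fun c => !(c == ""))),
         PySem.Set.ofList (((pvGrp records s).map (fun r => pvGetStrip r "notes")).filter (fun c => !(c == "")))) := by
  have h1 : records.foldl (pvB_collectStep s) (PySem.Set.empty, PySem.Set.empty)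
      = (pvGrp records s).foldl
          (fun cn r =>
            (if pvGetStrip r "component" == "" then cn.1 else PySem.Set.add cn.1 (pvGetStrip r "component"),
             if pvGetStrip r "notes" == "" then cn.2 else PySem.Set.add cn.2 (pvGetStrip r "notes")))
          (PySem.Set.empty, PySem.Set.empty) := by
    unfold pvGrp
    rw [← PySem.List.foldl_if_eq_foldl_filter]
    refine PySem.List.foldl_congr_mem _ _ _ _ ?_
    intro acc r _
    by_cases h : pvGetStrip r "source" = s
    · simp only [pvB_collectStep, pvKey, h, beq_self_eq_true, Bool.not_true, Bool.false_eq_true,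
        if_false, if_true]
      split_ifs <;> rfl
    · simp [pvB_collectStep, pvKey, h]
  rw [h1, PySem.List.foldl_prod_mk
    (f := fun c r => if pvGetStrip r "component" == "" then c else PySem.Set.add c (pvGetStrip r "component"))
    (g := fun c r => if pvGetStrip r "notes" == "" then c else PySem.Set.add c (pvGetStrip r "notes"))]
  have hco (k : String) :
      (pvGrp records s).foldl
          (fun c r => if pvGetStrip r k == "" then c else PySem.Set.add c (pvGetStrip r k))
          PySem.Set.empty
        = PySem.Set.ofList (((pvGrp records s).map (fun r => pvGetStrip r k)).filter (fun c => !(c == ""))) := by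
    have h2 : (pvGrp records s).foldl
        (fun c r => if pvGetStrip r k == "" then c else PySem.Set.add c (pvGetStrip r k))
        PySem.Set.empty
        = ((pvGrp records s).filter (fun r => !(pvGetStrip r k == ""))).foldl
            (fun c r => PySem.Set.add c (pvGetStrip r k)) PySem.Set.empty := by
      rw [← PySem.List.foldl_if_eq_foldl_filter]
      refine PySem.List.foldl_congr_mem _ _ _ _ ?_
      intro acc r _
      by_cases h : pvGetStrip r k == "" <;> simp [h]
    rw [h2, ← PySem.Set.update_map_eq_foldl_add, PySem.Set.update_empty, List.filter_map]
    rfl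
  rw [hco, hco]

lemma pv_head_sorted_eq_min (xs : List String) :
    (PySem.List.sorted xs id).head? = PySem.List.min? xs id := by
  cases hs : PySem.List.sorted xs id with
  | nil =>
    have hx : xs = [] := by
      have hl := PySem.List.length_sorted xs id false
      rw [hs] at hl
      exact List.eq_nil_of_length_eq_zero hl.symm
    subst hx
    simp [PySem.List.min?]
  | cons h t =>
    have hxne : xs ≠ [] := by
      intro hx
      have hl := PySem.List.length_sorted xs id false
      rw [hs, hx] at hl
      simp at hl
    obtain ⟨m, hm⟩ : ∃ m, PySem.List.min? xs id = some m := by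
      cases hmin : PySem.List.min? xs id with
      | none => exact absurd ((PySem.List.min?_eq_none_iff xs id).mp hmin) hxne
      | some m => exact ⟨m, rfl⟩
    rw [hm]
    have hhx : h ∈ xs := by
      have hmem : h ∈ PySem.List.sorted xs id := by rw [hs]; exact List.mem_cons_self
      exact (PySem.List.mem_sorted xs id false h).mp hmem
    have hmh : m ≤ h := by simpa using PySem.List.min?_isMin hm h hhx
    have hmem : m ∈ PySem.List.sorted xs id :=
      (PySem.List.mem_sorted xs id false m).mpr (PySem.List.min?_mem hm)
    rw [hs] at hmem
    have hpw := PySem.List.sorted_pairwise xs id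
    rw [hs] at hpw
    rcases List.mem_cons.mp hmem with h1 | h1
    · simp [h1]
    · have hhm : h ≤ m := by simpa using (List.pairwise_cons.mp hpw).1 m h1
      simp [le_antisymm hhm hmh]

lemma pv_sorted_isEmpty (xs : List String) :
    (PySem.List.sorted xs id).isEmpty = xs.isEmpty := by
  by_cases h : xs = []
  · subst h; rfl
  · have h2 : PySem.List.sorted xs id ≠ [] := by
      intro hc
      have hl := PySem.List.length_sorted xs id false
      rw [hc] at hl
      exact h (List.eq_nil_of_length_eq_zero hl.symm)
    rw [List.isEmpty_eq_false_iff.mpr h2, List.isEmpty_eq_false_iff.mpr h]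

lemma pv_format_eq (records : List (List (String × String))) (cat : PySem.Dict String String)
    (s : String) :
    pvB_sourceStep records cat s = pvA_formatStep cat (s, pvGrp records s) := by
  simp only [pvB_sourceStep, pvA_formatStep, pv_collect_eq]
  set C := PySem.Set.ofList (((pvGrp records s).map (fun r => pvGetStrip r "component")).filter (fun c => !(c == ""))) with hC
  set N := PySem.Set.ofList (((pvGrp records s).map (fun r => pvGetStrip r "notes")).filter (fun c => !(c == ""))) with hN
  have hE : (PySem.List.sorted C id).isEmpty = C.isEmpty := pv_sorted_isEmpty C
  rcases hsort : PySem.List.sorted N id with _ | ⟨n, t⟩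
  · have hn : N = [] := by
      have hl := PySem.List.length_sorted N id false
      rw [hsort] at hl
      exact List.eq_nil_of_length_eq_zero hl.symm
    simp [hn]
  · have hNne : N ≠ [] := by
      intro hc
      rw [hc] at hsort
      exact (List.cons_ne_nil n t) hsort.symm
    have hmin : PySem.List.min? N id = some n := by
      have hh := pv_head_sorted_eq_min N
      rw [hsort] at hh
      exact hh.symm
    simp [hmin, List.isEmpty_eq_false_iff.mpr hNne]

-- A's finished grouped dict, entry by entry: keys = B's seen list, values = the per-source filters
lemma pv_items_eq (records : List (List (String × String))) :
    (records.foldl pvA_groupStep (PySem.Dict.mk [])).items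
      = (records.foldl pvSeenStep []).map (fun s => (s, pvGrp (pvFilt records) s)) := by
  rw [pv_group_filter, pv_seen_eq]
  set G := (pvFilt records).foldl (fun d r => d.modify (pvKey r) [] (fun l => l ++ [r])) (PySem.Dict.mk []) with hG
  have hnodup : G.keys.Nodup := by
    rw [hG]
    exact PySem.Dict.nodup_keys_foldl_modify_key _ pvKey [] (fun _ r => fun l => l ++ [r]) _ (by simp)
  have hkeys : G.keys = PySem.Set.ofList ((pvFilt records).map pvKey) := by
    rw [hG, PySem.Dict.keys_foldl_modify_key]
    simp [PySem.Set.update_nil_left]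
  have hget (s : String) : G.getD s [] = pvGrp (pvFilt records) s := by
    rw [hG]
    have hfold : (pvFilt records).foldl (fun d r => d.modify (pvKey r) [] (fun l => l ++ [r])) (PySem.Dict.mk [])
        = ((pvFilt records).map (fun r => (pvKey r, r))).foldl
            (fun d p => d.modify p.1 [] (fun l => l ++ [p.2])) (PySem.Dict.mk []) := by
      rw [List.foldl_map]
    rw [hfold, PySem.Dict.getD_foldl_modify_append]
    simp [pvGrp, List.filter_map, Function.comp_def, List.map_map,
      PySem.Dict.getD, PySem.Dict.get?]
  rw [PySem.Dict.items_eq_map_keys G hnodup [], hkeys]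
  refine List.map_congr_left ?_
  intro s _
  simp [hget s]

-- ===== VERDICT (by name: the statement is the Claim_ definition above) =====
theorem build_source_catalog_from_records_py_spec : Claim_equal_build_source_catalog_from_records_py := by
  intro records _
  unfold Spec_build_source_catalog_from_records_py
  unfold build_source_catalog_from_records_py build_source_catalog_from_records_py_alt
  rw [pv_items_eq, List.foldl_map]
  refine congrArg PySem.Dict.items ?_
  refine PySem.List.foldl_congr_mem _ _ _ _ ?_
  intro cat s hs
  rw [pv_format_eq, pv_grp_filt records s (pv_seen_ne records s hs)]
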